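-- pv_equiv track=rewrite | github.com/Kawser-nerd/CLCDSA | Source Codes/AtCoder/abc025/C/3866179.py | dfs
-- ===== SOURCE A (Python) =====
-- def adj(grid, turn):
--     for i in range(9):
--         if grid[i] == -1:
--             next_grid = list(grid)
--             next_grid[i] = turn
--             yield tuple(next_grid)
--
-- def dfs(grid, turn, memo):
--     if grid in memo:
--         return memo[grid]
--     else:
--         if turn == 1:
--             value = max(dfs(next_grid, 0, memo) for next_grid in adj(grid, turn))
--         else:
--             value = min(dfs(next_grid, 1, memo) for next_grid in adj(grid, turn))
--         memo[grid] = value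
--         return value
-- ===== SOURCE B (Python) =====
-- def dfs(grid, turn, memo):
--     # Iterative two-phase level DP instead of memoized recursion: forward pass
--     # collects the reachable positions level by level (memoized positions are
--     # kept as leaves, not expanded), backward pass folds each level with
--     # max/min over the already-evaluated next level.
--     if grid in memo:
--         return memo[grid]
--     levels = [([grid], turn)]
--     while True:
--         cur, t = levels[-1]
--         nxt, seen = [], set()
--         for g in cur:
--             if g in memo:
--                 continue
--             for i in range(9):
--                 if g[i] == -1:
--                     child = list(g)
--                     child[i] = t
--                     child = tuple(child)
--                     if child not in seen:
--                         seen.add(child)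
--                         nxt.append(child)
--         if not nxt:
--             break
--         levels.append((nxt, 0 if t == 1 else 1))
--     val = {}
--     for cur, t in reversed(levels):
--         for g in cur:
--             if g in memo:
--                 val[g] = memo[g]
--             else:
--                 best = None
--                 for i in range(9):
--                     if g[i] == -1:
--                         child = list(g)
--                         child[i] = t
--                         child = tuple(child)
--                         v = val[child]
--                         if best is None:
--                             best = v
--                         elif t == 1:
--                             best = max(best, v)
--                         else:
--                             best = min(best, v)
--                 if best is None:
--                     raise ValueError("finished position absent from memo")
--                 memo[g] = best
--                 val[g] = best
--     return val[grid]
-- ===== Notes on version B (the rewrite author's own statement) =====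
-- stated objective: alternative
-- what changed: Replaces the memoized recursive DFS (generator + max/min inside the recursion) by an iterative two-phase level dynamic program: a forward pass collects the reachable positions level by level (memoized positions are kept as leaves, not expanded), then a backward pass folds each level with max/min over the already-evaluated level below; same memo writes, no recursion.
import Mathlib
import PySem

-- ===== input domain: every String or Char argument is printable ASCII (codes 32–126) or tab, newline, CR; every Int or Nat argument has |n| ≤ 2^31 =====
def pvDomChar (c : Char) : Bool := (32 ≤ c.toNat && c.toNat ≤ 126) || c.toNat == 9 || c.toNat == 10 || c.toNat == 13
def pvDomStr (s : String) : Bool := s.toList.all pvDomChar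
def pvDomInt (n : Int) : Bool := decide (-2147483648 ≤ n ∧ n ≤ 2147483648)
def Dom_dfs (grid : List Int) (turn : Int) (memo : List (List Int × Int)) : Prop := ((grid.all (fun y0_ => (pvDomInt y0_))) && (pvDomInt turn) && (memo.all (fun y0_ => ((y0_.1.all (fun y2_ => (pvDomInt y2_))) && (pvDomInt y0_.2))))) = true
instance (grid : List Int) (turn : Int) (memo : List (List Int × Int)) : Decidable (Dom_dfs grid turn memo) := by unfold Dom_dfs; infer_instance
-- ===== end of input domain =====

-- B replaces the memoized recursion by an iterative two-phase level DP (forward reachable levels,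
-- backward max/min folds); same return value, and both versions write the same memo entries in place
-- (the theorems below are about the return value only).

-- ===== PORT A =====
-- max()/min() of a Python generator; [] is Python's ValueError case, excluded by Pre_dfs
def pyMaxA : List Int → Int
  | [] => 0
  | x :: xs => xs.foldl max x

def pyMinA : List Int → Int
  | [] => 0
  | x :: xs => xs.foldl min x

-- adj(grid, turn): the generator loop 'for i in range(9): if grid[i] == -1: yield …'
def adjA (grid : List Int) (turn : Int) : List (List Int) :=
  (List.range 9).foldl (fun acc (i : Nat) =>
    if PySem.List.pyGet? grid (i : Int) = some (-1) then acc ++ [grid.set i turn] else acc) []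

-- dfs with the memo dict threaded through; fuel 12 is never exhausted (recursion depth ≤ blanks + 2 ≤ 11)
def dfsA : Nat → List Int → Int → PySem.Dict (List Int) Int → Int × PySem.Dict (List Int) Int
  | 0, _, _, memo => (0, memo)
  | fuel + 1, grid, turn, memo =>
    match PySem.Dict.get? memo grid with
    | some v => (v, memo)
    | none =>
      let r := (adjA grid turn).foldl (fun p c =>
        let q := dfsA fuel c (if turn == 1 then 0 else 1) p.2
        (p.1 ++ [q.1], q.2)) (([] : List Int), memo)
      let value := if turn == 1 then pyMaxA r.1 else pyMinA r.1
      (value, PySem.Dict.insert r.2 grid value)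

def dfs (grid : List Int) (turn : Int) (memo : List (List Int × Int)) : Int :=
  (dfsA 12 grid turn (PySem.Dict.ofList memo)).1

-- ===== PORT B =====
-- the successor positions of g on move t (the inner 'for i in range(9)' loop of Source B)
def succsB (g : List Int) (t : Int) : List (List Int) :=
  (List.range 9).filterMap (fun (i : Nat) =>
    if PySem.List.pyGet? g (i : Int) = some (-1) then some (g.set i t) else none)

-- the running best=None/max/min accumulator; [] is Python's ValueError case, excluded by Pre_dfs
def bestB (isMax : Bool) : List Int → Int
  | [] => 0
  | x :: xs => xs.foldl (fun a b => if isMax then max a b else min a b) x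

-- forward phase: reachable levels (memoized positions are not expanded); fuel 12 mirrors the
-- unbounded Python while-loop, which runs at most blanks + 2 ≤ 11 rounds
def forwardB : Nat → PySem.Dict (List Int) Int → List (List Int) → Int → List (List (List Int) × Int)
  | 0, _, _, _ => []
  | fuel + 1, memo, cur, t =>
    let nxt := PySem.List.dedup
      ((cur.filter (fun g => (PySem.Dict.get? memo g).isNone)).flatMap (fun g => succsB g t))
    if nxt.isEmpty then [(cur, t)]
    else (cur, t) :: forwardB fuel memo nxt (if t == 1 then 0 else 1)

-- backward phase, one level: st = (memo, val); val[c] is present for every needed c (else Python's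
-- KeyError, excluded by Pre_dfs; getD 0 marks that spot)
def evalLevelB (st : PySem.Dict (List Int) Int × PySem.Dict (List Int) Int)
    (lvl : List (List Int)) (t : Int) : PySem.Dict (List Int) Int × PySem.Dict (List Int) Int :=
  lvl.foldl (fun st g =>
    match PySem.Dict.get? st.1 g with
    | some x => (st.1, PySem.Dict.insert st.2 g x)
    | none =>
      let value := bestB (t == 1) ((succsB g t).map (fun c => PySem.Dict.getD st.2 c 0))
      (PySem.Dict.insert st.1 g value, PySem.Dict.insert st.2 g value)) st

def dfs_alt (grid : List Int) (turn : Int) (memo : List (List Int × Int)) : Int :=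
  match PySem.Dict.get? (PySem.Dict.ofList memo) grid with
  | some v => v
  | none =>
    let st := (forwardB 12 (PySem.Dict.ofList memo) [grid] turn).reverse.foldl
      (fun st p => evalLevelB st p.1 p.2) (PySem.Dict.ofList memo, PySem.Dict.empty)
    PySem.Dict.getD st.2 grid 0

-- ===== PRECONDITION & SPEC =====
-- the successor positions of a game-tree node (used only to state Pre_dfs)
def succsP (g : List Int) (t : Int) : List (List Int) :=
  (List.range 9).filterMap (fun (i : Nat) =>
    if PySem.List.pyGet? g (i : Int) = some (-1) then some (g.set i t) else none)

-- "every play from g that avoids memoized positions ends in a memoized position before running out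
-- of moves"; a play fills one blank per step, so depth ≤ 9 blanks and fuel 10 is never exhausted
def okP : Nat → List Int → Int → PySem.Dict (List Int) Int → Bool
  | 0, g, _, m => (PySem.Dict.get? m g).isSome
  | f + 1, g, t, m =>
    (PySem.Dict.get? m g).isSome ||
      (!(succsP g t).isEmpty && (succsP g t).all (fun c => okP f c (if t == 1 then 0 else 1) m))

-- Pre_dfs excludes ONLY inputs on which the Python A does not return: grid absent from memo with
-- fewer than 9 cells (IndexError), turn = -1 on an unmemoized grid with blanks (filling a blank
-- with -1 recreates the same position: unbounded recursion), and grids from which some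
-- memo-avoiding play reaches a position with no blanks that is absent from memo (max()/min() of an
-- empty generator: ValueError).
def Pre_dfs (grid : List Int) (turn : Int) (memo : List (List Int × Int)) : Prop :=
  (PySem.Dict.get? (PySem.Dict.ofList memo) grid).isSome = true ∨
    (9 ≤ grid.length ∧ turn ≠ -1 ∧ okP 10 grid turn (PySem.Dict.ofList memo) = true)
instance (grid : List Int) (turn : Int) (memo : List (List Int × Int)) : Decidable (Pre_dfs grid turn memo) := by
  unfold Pre_dfs; infer_instance

def pvWitness_dfs : List Int × Int × (List (List Int × Int)) :=
  ([-1, -1, 0, 1, 0, 1, 0, 1, 0], 1,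
    [([0, 0, 0, 1, 0, 1, 0, 1, 0], 1), ([0, 1, 0, 1, 0, 1, 0, 1, 0], 2),
     ([1, 0, 0, 1, 0, 1, 0, 1, 0], 3), ([1, 1, 0, 1, 0, 1, 0, 1, 0], 4)])

def Spec_dfs (grid : List Int) (turn : Int) (memo : List (List Int × Int)) (out : Int) : Prop := out = dfs_alt grid turn memo
instance (grid : List Int) (turn : Int) (memo : List (List Int × Int)) (out : Int) : Decidable (Spec_dfs grid turn memo out) := by unfold Spec_dfs; infer_instance

-- ===== CLAIM (what is proved, stated in full; the proofs are below) =====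
def Claim_equal_dfs : Prop := ∀ (grid : List Int) (turn : Int) (memo : List (List Int × Int)), Dom_dfs grid turn memo → Pre_dfs grid turn memo → Spec_dfs grid turn memo (dfs grid turn memo)

-- ===== LEMMAS AND PROOFS =====

def blanksN (g : List Int) : Nat :=
  ((List.range 9).filter (fun (i : Nat) => decide (PySem.List.pyGet? g (i : Int) = some (-1)))).length

theorem filterMap_ite_eq_map_filter {α β : Type} (l : List α) (p : α → Prop) [DecidablePred p] (f : α → β) :
    l.filterMap (fun i => if p i then some (f i) else none) =
      (l.filter (fun i => decide (p i))).map f := by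
  induction l with
  | nil => rfl
  | cons a l ih => by_cases h : p a <;> simp [h, ih]

theorem adjA_eq_succsB (g : List Int) (t : Int) : adjA g t = succsB g t := by
  unfold adjA succsB
  rw [PySem.List.foldl_append_ite (p := fun i : Nat => PySem.List.pyGet? g (i : Int) = some (-1)) (f := fun i : Nat => g.set i t)]
  rw [filterMap_ite_eq_map_filter]
  rfl

theorem mem_succsB {c g : List Int} {t : Int} (h : c ∈ succsB g t) :
    ∃ i : Nat, i < 9 ∧ PySem.List.pyGet? g (i : Int) = some (-1) ∧ c = g.set i t := by
  unfold succsB at h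
  simp only [List.mem_filterMap, List.mem_range] at h
  obtain ⟨i, hi, hif⟩ := h
  by_cases hp : PySem.List.pyGet? g (i : Int) = some (-1)
  · rw [if_pos hp] at hif
    exact ⟨i, hi, hp, (Option.some_injective _ hif).symm⟩
  · rw [if_neg hp] at hif; exact absurd hif (by simp)

theorem succsB_eq_nil_iff (g : List Int) (t : Int) : succsB g t = [] ↔ blanksN g = 0 := by
  unfold succsB blanksN
  rw [filterMap_ite_eq_map_filter]
  simp [List.map_eq_nil_iff, List.length_eq_zero_iff]

theorem blanksN_pos_of_mem_succsB {c g : List Int} {t : Int} (h : c ∈ succsB g t) : 1 ≤ blanksN g := by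
  rcases Nat.eq_zero_or_pos (blanksN g) with h0 | h1
  · rw [← succsB_eq_nil_iff g t] at h0; simp [h0] at h
  · exact h1

theorem blanksN_le (g : List Int) : blanksN g ≤ 9 := by
  unfold blanksN
  calc ((List.range 9).filter _).length ≤ (List.range 9).length := List.length_filter_le _ _
  _ = 9 := List.length_range

theorem filter_length_update {l : List Nat} (hnd : l.Nodup) {i : Nat} (hi : i ∈ l)
    {p p' : Nat → Bool} (hpi : p i = true) (hp'i : p' i = false)
    (hagree : ∀ j ∈ l, j ≠ i → p' j = p j) :
    (l.filter p').length + 1 = (l.filter p).length := by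
  induction l with
  | nil => simp at hi
  | cons a l ih =>
    rcases List.mem_cons.mp hi with h | hi'
    · subst h
      have hnot : i ∉ l := (List.nodup_cons.mp hnd).1
      have : l.filter p' = l.filter p := by
        apply List.filter_congr
        intro j hj
        exact hagree j (List.mem_cons_of_mem _ hj) (fun h => hnot (h ▸ hj))
      simp [hpi, hp'i, this]
    · have hne : a ≠ i := fun h => (List.nodup_cons.mp hnd).1 (h ▸ hi')
      have ha := hagree a (by simp) hne
      have ih' := ih (List.nodup_cons.mp hnd).2 hi' (fun j hj hji => hagree j (List.mem_cons_of_mem _ hj) hji)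
      by_cases hpa : p a <;> simp [hpa, ha ▸ hpa, ih']

theorem blanksN_set {g : List Int} {i : Nat} {t : Int} (hi : i < 9)
    (hg : PySem.List.pyGet? g (i : Int) = some (-1)) (ht : t ≠ -1) :
    blanksN (g.set i t) = blanksN g - 1 := by
  have hlen : i < g.length := by
    rw [PySem.List.pyGet?_natCast] at hg
    exact (List.getElem?_eq_some_iff.mp hg).1
  have key : blanksN (g.set i t) + 1 = blanksN g := by
    unfold blanksN
    apply filter_length_update (List.nodup_range) (List.mem_range.mpr hi)
    · simp [hg]
    · simp only [PySem.List.pyGet?_natCast, decide_eq_false_iff_not]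
      rw [List.getElem?_set_self' ]
      simp only [List.getElem?_eq_getElem hlen]
      intro hcontra
      simp at hcontra
      exact ht hcontra
    · intro j hj hji
      simp only [PySem.List.pyGet?_natCast]
      rw [List.getElem?_set_ne (by omega)]
  omega

theorem blanksN_succsB {c g : List Int} {t : Int} (h : c ∈ succsB g t) (ht : t ≠ -1) :
    blanksN c = blanksN g - 1 := by
  obtain ⟨i, hi, hg, rfl⟩ := mem_succsB h
  exact blanksN_set hi hg ht

def vfuel : Nat → List Int → Int → PySem.Dict (List Int) Int → Int
  | 0, g, _, m0 => (match PySem.Dict.get? m0 g with | some x => x | none => 0)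
  | fuel + 1, g, t, m0 =>
    match PySem.Dict.get? m0 g with
    | some x => x
    | none => bestB (t == 1) ((succsB g t).map (fun c => vfuel fuel c (if t == 1 then 0 else 1) m0))

def Vv (g : List Int) (t : Int) (m0 : PySem.Dict (List Int) Int) : Int := vfuel (blanksN g) g t m0

theorem Vv_mem {g : List Int} {x : Int} {m0 : PySem.Dict (List Int) Int}
    (h : PySem.Dict.get? m0 g = some x) (t : Int) : Vv g t m0 = x := by
  unfold Vv
  cases hb : blanksN g <;> simp [vfuel, h]

theorem Vv_unfold {g : List Int} {t : Int} {m0 : PySem.Dict (List Int) Int}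
    (h : PySem.Dict.get? m0 g = none) (ht : t ≠ -1) :
    Vv g t m0 = bestB (t == 1) ((succsB g t).map (fun c => Vv c (if t == 1 then 0 else 1) m0)) := by
  unfold Vv
  cases hb : blanksN g with
  | zero =>
    have hnil : succsB g t = [] := (succsB_eq_nil_iff g t).mpr hb
    simp [vfuel, h, hnil, bestB]
  | succ n =>
    simp only [vfuel, h]
    congr 1
    apply List.map_congr_left
    intro c hc
    have : blanksN c = n := by rw [blanksN_succsB hc ht, hb]; omega
    rw [this]

theorem pyMaxA_eq_bestB (xs : List Int) : pyMaxA xs = bestB true xs := by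
  cases xs <;> rfl

theorem pyMinA_eq_bestB (xs : List Int) : pyMinA xs = bestB false xs := by
  cases xs <;> rfl

-- the turn the other player moves with: 0 after a '1', else 1 (children always move with 0/1)
def flip01 (t : Int) : Int := if t == 1 then 0 else 1

theorem flip01_flip01_flip01 (t : Int) : flip01 (flip01 (flip01 t)) = flip01 t := by
  by_cases h : t == 1 <;> simp [flip01, h]

theorem flip01_ne_neg_one (t : Int) : flip01 t ≠ -1 := by
  unfold flip01; split <;> decide

-- the turn A moves with at a position with b blanks, starting from t0 at b0 blanks
def taF (t0 : Int) (b0 b : Nat) : Int :=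
  if b = b0 then t0 else if (b0 - b) % 2 = 1 then flip01 t0 else flip01 (flip01 t0)

theorem taF_self (t0 : Int) (b0 : Nat) : taF t0 b0 b0 = t0 := by
  simp [taF]

theorem taF_ne_neg_one (t0 : Int) (b0 b : Nat) (h : t0 ≠ -1) : taF t0 b0 b ≠ -1 := by
  unfold taF
  split
  · exact h
  · split
    · exact flip01_ne_neg_one t0
    · exact flip01_ne_neg_one (flip01 t0)

theorem taF_flip (t0 : Int) (b0 b : Nat) (hb : 1 ≤ b) (hb0 : b ≤ b0) :
    (if taF t0 b0 b == 1 then (0 : Int) else 1) = taF t0 b0 (b - 1) := by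
  have hL : (if taF t0 b0 b == 1 then (0 : Int) else 1) = flip01 (taF t0 b0 b) := rfl
  rw [hL]
  unfold taF
  by_cases hbb : b = b0
  · subst hbb
    have h1 : ¬(b - 1 = b) := by omega
    have h2 : (b - (b - 1)) % 2 = 1 := by omega
    simp [h1, h2]
  · have h1 : ¬(b - 1 = b0) := by omega
    by_cases h2 : (b0 - b) % 2 = 1
    · have h3 : ¬((b0 - (b - 1)) % 2 = 1) := by omega
      simp [hbb, h1, h2, h3]
    · have h3 : (b0 - (b - 1)) % 2 = 1 := by omega
      simp [hbb, h1, h2, h3, flip01_flip01_flip01]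

def InvA (m0 : PySem.Dict (List Int) Int) (t0 : Int) (b0 : Nat) (m : PySem.Dict (List Int) Int) : Prop :=
  (∀ g : List Int, (PySem.Dict.get? m0 g).isSome = true → PySem.Dict.get? m g = PySem.Dict.get? m0 g) ∧
  (∀ (g : List Int) (x : Int), PySem.Dict.get? m g = some x → PySem.Dict.get? m0 g = none →
    x = Vv g (taF t0 b0 (blanksN g)) m0)

theorem foldA_lemma (fuel : Nat) (t' : Int) (m0 : PySem.Dict (List Int) Int) (t0 : Int) (b0 : Nat)
    (cs : List (List Int))
    (Hstep : ∀ c ∈ cs, ∀ m : PySem.Dict (List Int) Int, InvA m0 t0 b0 m →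
      (dfsA fuel c t' m).1 = Vv c t' m0 ∧ InvA m0 t0 b0 (dfsA fuel c t' m).2 ∧
      (∀ (g' : List Int) (y : Int), PySem.Dict.get? m g' = some y →
        PySem.Dict.get? (dfsA fuel c t' m).2 g' = some y)) :
    ∀ (acc : List Int) (m : PySem.Dict (List Int) Int), InvA m0 t0 b0 m →
      (cs.foldl (fun p c => let q := dfsA fuel c t' p.2; (p.1 ++ [q.1], q.2)) (acc, m)).1
        = acc ++ cs.map (fun c => Vv c t' m0) ∧
      InvA m0 t0 b0 (cs.foldl (fun p c => let q := dfsA fuel c t' p.2; (p.1 ++ [q.1], q.2)) (acc, m)).2 ∧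
      (∀ (g' : List Int) (y : Int), PySem.Dict.get? m g' = some y →
        PySem.Dict.get? (cs.foldl (fun p c => let q := dfsA fuel c t' p.2; (p.1 ++ [q.1], q.2)) (acc, m)).2 g' = some y) := by
  induction cs with
  | nil => intro acc m hm; exact ⟨by simp, hm, fun _ _ h => h⟩
  | cons c cs ih =>
    intro acc m hm
    obtain ⟨h1, h2, h3⟩ := Hstep c (by simp) m hm
    have ih' := ih (fun c' hc' => Hstep c' (by simp [hc']))
      (acc ++ [(dfsA fuel c t' m).1]) (dfsA fuel c t' m).2 h2
    refine ⟨?_, ih'.2.1, ?_⟩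
    · simp only [List.foldl_cons]
      rw [ih'.1, h1]
      simp
    · intro g' y hy
      exact ih'.2.2 g' y (h3 g' y hy)

theorem dfsA_main (m0 : PySem.Dict (List Int) Int) (t0 : Int) (ht0 : t0 ≠ -1) (b0 : Nat) :
    ∀ (b : Nat), b ≤ b0 → ∀ (fuel : Nat), b < fuel → ∀ (g : List Int), blanksN g = b →
    ∀ (m : PySem.Dict (List Int) Int), InvA m0 t0 b0 m →
      (dfsA fuel g (taF t0 b0 b) m).1 = Vv g (taF t0 b0 b) m0 ∧
      InvA m0 t0 b0 (dfsA fuel g (taF t0 b0 b) m).2 ∧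
      (∀ (g' : List Int) (y : Int), PySem.Dict.get? m g' = some y →
        PySem.Dict.get? (dfsA fuel g (taF t0 b0 b) m).2 g' = some y) := by
  intro b
  induction b using Nat.strong_induction_on with
  | _ b IH =>
    intro hb fuel hf g hg m hm
    cases fuel with
    | zero => omega
    | succ f =>
      cases hmg : PySem.Dict.get? m g with
      | some v =>
        refine ⟨?_, by simpa [dfsA, hmg] using hm, by intro g' y hy; simpa [dfsA, hmg] using hy⟩
        simp only [dfsA, hmg]
        cases ho : PySem.Dict.get? m0 g with
        | some x =>
          have := hm.1 g (by simp [ho])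
          rw [hmg, ho] at this
          rw [Vv_mem ho, ← Option.some_inj, this]
        | none =>
          have := hm.2 g v hmg ho
          rw [this, hg]
      | none =>
        have ho : PySem.Dict.get? m0 g = none := by
          cases ho : PySem.Dict.get? m0 g with
          | none => rfl
          | some x =>
            have := hm.1 g (by simp [ho])
            rw [hmg, ho] at this
            exact absurd this (by simp)
        have htb' : taF t0 b0 b ≠ -1 := taF_ne_neg_one t0 b0 b ht0
        -- step hypothesis for the children fold
        have Hstep : ∀ c ∈ succsB g (taF t0 b0 b), ∀ m' : PySem.Dict (List Int) Int, InvA m0 t0 b0 m' →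
            (dfsA f c (if taF t0 b0 b == 1 then (0:Int) else 1) m').1 = Vv c (if taF t0 b0 b == 1 then (0:Int) else 1) m0 ∧
            InvA m0 t0 b0 (dfsA f c (if taF t0 b0 b == 1 then (0:Int) else 1) m').2 ∧
            (∀ (g' : List Int) (y : Int), PySem.Dict.get? m' g' = some y →
              PySem.Dict.get? (dfsA f c (if taF t0 b0 b == 1 then (0:Int) else 1) m').2 g' = some y) := by
          intro c hc m' hm'
          have hb1 : 1 ≤ b := hg ▸ blanksN_pos_of_mem_succsB hc
          have hcb : blanksN c = b - 1 := by rw [blanksN_succsB hc htb', hg]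
          rw [taF_flip t0 b0 b hb1 hb]
          exact IH (b - 1) (by omega) (by omega) f (by omega) c hcb m' hm'
        have hfold := foldA_lemma f (if taF t0 b0 b == 1 then (0:Int) else 1) m0 t0 b0
          (succsB g (taF t0 b0 b)) Hstep [] m hm
        simp only [dfsA, hmg, adjA_eq_succsB]
        set t := taF t0 b0 b with hteq
        set r := (succsB g t).foldl (fun p c =>
          let q := dfsA f c (if t == 1 then (0:Int) else 1) p.2
          (p.1 ++ [q.1], q.2)) (([] : List Int), m) with hr
        have hval : (if t == 1 then pyMaxA r.1 else pyMinA r.1) = Vv g t m0 := by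
          rw [hfold.1]
          rw [Vv_unfold ho htb']
          simp only [List.nil_append]
          cases h1 : (t == 1) <;> simp [pyMaxA_eq_bestB, pyMinA_eq_bestB]
        refine ⟨by simpa using hval, ?_, ?_⟩
        · constructor
          · intro g'' hs
            have hne : g'' ≠ g := by
              intro h; rw [h] at hs
              rw [ho] at hs; simp at hs
            rw [PySem.Dict.get?_insert]
            rw [if_neg hne]
            exact hfold.2.1.1 g'' hs
          · intro g'' x hx hx0
            rw [PySem.Dict.get?_insert] at hx
            by_cases hne : g'' = g
            · rw [if_pos hne] at hx
              subst hne
              rw [hg, ← hteq]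
              exact (Option.some_inj.mp hx).symm.trans hval
            · rw [if_neg hne] at hx
              exact hfold.2.1.2 g'' x hx hx0
        · intro g' y hy
          have hne : g' ≠ g := by intro h; rw [h, hmg] at hy; exact absurd hy (by simp)
          rw [PySem.Dict.get?_insert, if_neg hne]
          exact hfold.2.2 g' y hy

theorem evalLevelB_main (m0 : PySem.Dict (List Int) Int) (t : Int) (B : Nat) (ht : t ≠ -1) :
    ∀ (lvl : List (List Int)), lvl.Nodup → (∀ g ∈ lvl, blanksN g = B) →
    ∀ (m val : PySem.Dict (List Int) Int),
      (∀ g ∈ lvl, PySem.Dict.get? m g = PySem.Dict.get? m0 g) →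
      (∀ g ∈ lvl, PySem.Dict.get? m0 g = none → ∀ c ∈ succsB g t,
        PySem.Dict.get? val c = some (Vv c (if t == 1 then 0 else 1) m0)) →
      (∀ g ∈ lvl, PySem.Dict.get? (evalLevelB (m, val) lvl t).2 g = some (Vv g t m0)) ∧
      (∀ k : List Int, k ∉ lvl → PySem.Dict.get? (evalLevelB (m, val) lvl t).2 k = PySem.Dict.get? val k) ∧
      (∀ k : List Int, k ∉ lvl → PySem.Dict.get? (evalLevelB (m, val) lvl t).1 k = PySem.Dict.get? m k) := by
  intro lvl
  induction lvl with
  | nil => intro _ _ m val _ _; exact ⟨by simp, fun _ _ => rfl, fun _ _ => rfl⟩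
  | cons g rest ih =>
    intro hnd hB m val hm hval
    have hgrest : g ∉ rest := (List.nodup_cons.mp hnd).1
    have hgB : blanksN g = B := hB g (by simp)
    -- a successor of any level-B node is not itself a level node
    have hcne : ∀ g' ∈ g :: rest, ∀ c ∈ succsB g' t, c ≠ g := by
      intro g' hg' c hc hcg
      have h1 : 1 ≤ blanksN g' := blanksN_pos_of_mem_succsB hc
      have h2 : blanksN c = blanksN g' - 1 := blanksN_succsB hc ht
      rw [hB g' hg'] at h1 h2
      rw [hcg, hgB] at h2
      omega
    cases hmo : PySem.Dict.get? m0 g with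
    | some x =>
      have hmg : PySem.Dict.get? m g = some x := (hm g (by simp)).trans hmo
      have hstep : evalLevelB (m, val) (g :: rest) t = evalLevelB (m, PySem.Dict.insert val g x) rest t := by
        simp only [evalLevelB, List.foldl_cons, hmg]
      obtain ⟨A1, A2, A3⟩ := ih (List.nodup_cons.mp hnd).2 (fun g' h => hB g' (by simp [h]))
        m (PySem.Dict.insert val g x)
        (fun g' h => hm g' (by simp [h]))
        (by
          intro g' h hg0 c hc
          rw [PySem.Dict.get?_insert, if_neg (hcne g' (by simp [h]) c hc)]
          exact hval g' (by simp [h]) hg0 c hc)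
      rw [hstep]
      refine ⟨?_, ?_, ?_⟩
      · intro g' hg'
        rcases List.mem_cons.mp hg' with h | h
        · subst h
          rw [A2 g' hgrest, PySem.Dict.get?_insert, if_pos rfl, Vv_mem hmo]
        · exact A1 g' h
      · intro k hk
        rw [A2 k (fun h => hk (by simp [h])), PySem.Dict.get?_insert,
          if_neg (fun h => hk (by simp [h]))]
      · intro k hk
        exact A3 k (fun h => hk (by simp [h]))
    | none =>
      have hmg : PySem.Dict.get? m g = none := (hm g (by simp)).trans hmo
      have hvv : bestB (t == 1) ((succsB g t).map (fun c => PySem.Dict.getD val c 0)) = Vv g t m0 := by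
        rw [Vv_unfold hmo ht]
        congr 1
        apply List.map_congr_left
        intro c hc
        rw [PySem.Dict.getD_eq_get?_getD, hval g (by simp) hmo c hc]
        rfl
      have hstep : evalLevelB (m, val) (g :: rest) t =
          evalLevelB (PySem.Dict.insert m g (Vv g t m0), PySem.Dict.insert val g (Vv g t m0)) rest t := by
        simp only [evalLevelB, List.foldl_cons, hmg, hvv]
      obtain ⟨A1, A2, A3⟩ := ih (List.nodup_cons.mp hnd).2 (fun g' h => hB g' (by simp [h]))
        (PySem.Dict.insert m g (Vv g t m0)) (PySem.Dict.insert val g (Vv g t m0))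
        (by
          intro g' h
          have hne : g' ≠ g := fun he => hgrest (he ▸ h)
          rw [PySem.Dict.get?_insert, if_neg hne]
          exact hm g' (by simp [h]))
        (by
          intro g' h hg0 c hc
          rw [PySem.Dict.get?_insert, if_neg (hcne g' (by simp [h]) c hc)]
          exact hval g' (by simp [h]) hg0 c hc)
      rw [hstep]
      refine ⟨?_, ?_, ?_⟩
      · intro g' hg'
        rcases List.mem_cons.mp hg' with h | h
        · subst h
          rw [A2 g' hgrest, PySem.Dict.get?_insert, if_pos rfl]
        · exact A1 g' h
      · intro k hk
        rw [A2 k (fun h => hk (by simp [h])), PySem.Dict.get?_insert,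
          if_neg (fun h => hk (by simp [h]))]
      · intro k hk
        rw [A3 k (fun h => hk (by simp [h])), PySem.Dict.get?_insert,
          if_neg (fun h => hk (by simp [h]))]

theorem forwardB_main (m0 : PySem.Dict (List Int) Int) :
    ∀ (fuel : Nat) (cur : List (List Int)) (t : Int) (B : Nat),
      (∀ g ∈ cur, blanksN g = B) → cur.Nodup → t ≠ -1 → B < fuel →
      (∀ g ∈ cur, PySem.Dict.get?
          ((forwardB fuel m0 cur t).reverse.foldl (fun st p => evalLevelB st p.1 p.2)
            (m0, PySem.Dict.empty)).2 g = some (Vv g t m0)) ∧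
      (∀ k : List Int, B < blanksN k → PySem.Dict.get?
          ((forwardB fuel m0 cur t).reverse.foldl (fun st p => evalLevelB st p.1 p.2)
            (m0, PySem.Dict.empty)).1 k = PySem.Dict.get? m0 k) := by
  intro fuel
  induction fuel with
  | zero => intro cur t B _ _ _ hf; omega
  | succ f ih =>
    intro cur t B hB hnd ht hf
    have hfw : forwardB (f + 1) m0 cur t =
        (if (PySem.List.dedup ((cur.filter (fun g => (PySem.Dict.get? m0 g).isNone)).flatMap
            (fun g => succsB g t))).isEmpty
          then [(cur, t)]
          else (cur, t) :: forwardB f m0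
            (PySem.List.dedup ((cur.filter (fun g => (PySem.Dict.get? m0 g).isNone)).flatMap
              (fun g => succsB g t))) (if t == 1 then 0 else 1)) := rfl
    set nxt := PySem.List.dedup ((cur.filter (fun g => (PySem.Dict.get? m0 g).isNone)).flatMap
      (fun g => succsB g t)) with hnxt
    by_cases hE : nxt.isEmpty
    · rw [hfw, if_pos hE]
      have hnil : ∀ g ∈ cur, PySem.Dict.get? m0 g = none → succsB g t = [] := by
        intro g hg hg0
        rcases hsn : succsB g t with _ | ⟨c, cs⟩
        · rfl
        · exfalso
          have hcin : c ∈ nxt := by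
            rw [hnxt, PySem.List.mem_dedup]
            exact List.mem_flatMap.mpr ⟨g, List.mem_filter.mpr ⟨hg, by simp [hg0]⟩, by simp [hsn]⟩
          rw [List.isEmpty_iff.mp hE] at hcin
          simp at hcin
      obtain ⟨E1, E2, E3⟩ := evalLevelB_main m0 t B ht cur hnd hB m0 PySem.Dict.empty
        (fun _ _ => rfl)
        (by intro g hg hg0 c hc; rw [hnil g hg hg0] at hc; simp at hc)
      refine ⟨?_, ?_⟩
      · intro g hg; simpa using E1 g hg
      · intro k hk
        have hkc : k ∉ cur := fun h => by have := hB k h; omega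
        simpa using E3 k hkc
    · rw [hfw, if_neg hE]
      have hBpos : 1 ≤ B := by
        rcases List.exists_mem_of_ne_nil nxt (fun h => hE (by rw [h]; rfl)) with ⟨c, hc⟩
        rw [hnxt, PySem.List.mem_dedup] at hc
        rcases List.mem_flatMap.mp hc with ⟨g', hg', hcg'⟩
        have := blanksN_pos_of_mem_succsB hcg'
        have := hB g' (List.mem_filter.mp hg').1
        omega
      have hBn : ∀ g ∈ nxt, blanksN g = B - 1 := by
        intro g hg
        rw [hnxt, PySem.List.mem_dedup] at hg
        rcases List.mem_flatMap.mp hg with ⟨g', hg', hgg'⟩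
        rw [blanksN_succsB hgg' ht, hB g' (List.mem_filter.mp hg').1]
      have ih' := ih nxt (if t == 1 then 0 else 1) (B - 1) hBn (by rw [hnxt]; exact PySem.List.nodup_dedup _)
        (by split <;> decide) (by omega)
      obtain ⟨P1, P2⟩ := ih'
      simp only [List.reverse_cons, List.foldl_append, List.foldl_cons, List.foldl_nil]
      obtain ⟨E1, E2, E3⟩ := evalLevelB_main m0 t B ht cur hnd hB
        ((forwardB f m0 nxt (if t == 1 then 0 else 1)).reverse.foldl
          (fun st p => evalLevelB st p.1 p.2) (m0, PySem.Dict.empty)).1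
        ((forwardB f m0 nxt (if t == 1 then 0 else 1)).reverse.foldl
          (fun st p => evalLevelB st p.1 p.2) (m0, PySem.Dict.empty)).2
        (by intro g hg; exact P2 g (by rw [hB g hg]; omega))
        (by
          intro g hg hg0 c hc
          have hcin : c ∈ nxt := by
            rw [hnxt, PySem.List.mem_dedup]
            exact List.mem_flatMap.mpr ⟨g, List.mem_filter.mpr ⟨hg, by simp [hg0]⟩, hc⟩
          exact P1 c hcin)
      refine ⟨?_, ?_⟩
      · intro g hg; exact E1 g hg
      · intro k hk
        have hkc : k ∉ cur := fun h => by have := hB k h; omega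
        rw [E3 k hkc]
        exact P2 k (by omega)

theorem dfs_eq_alt (grid : List Int) (turn : Int) (memo : List (List Int × Int))
    (hpre : Pre_dfs grid turn memo) : dfs grid turn memo = dfs_alt grid turn memo := by
  cases hg : PySem.Dict.get? (PySem.Dict.ofList memo) grid with
  | some v =>
    have h12 : (12 : Nat) = 11 + 1 := rfl
    unfold dfs dfs_alt
    rw [h12]
    simp only [dfsA, hg]
  | none =>
    rcases hpre with hs | ⟨_hlen, ht, _hok⟩
    · rw [hg] at hs; simp at hs
    · have hInv : InvA (PySem.Dict.ofList memo) turn (blanksN grid) (PySem.Dict.ofList memo) :=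
        ⟨fun _ _ => rfl, fun g x hx h0 => by rw [hx] at h0; cases h0⟩
      have hA := dfsA_main (PySem.Dict.ofList memo) turn ht (blanksN grid) (blanksN grid) le_rfl
        12 (by have := blanksN_le grid; omega) grid rfl (PySem.Dict.ofList memo) hInv
      rw [taF_self] at hA
      have hB := forwardB_main (PySem.Dict.ofList memo) 12 [grid] turn (blanksN grid)
        (by intro g hgm; rw [List.mem_singleton.mp hgm]) (by simp) ht
        (by have := blanksN_le grid; omega)
      have hBg := hB.1 grid (by simp)
      unfold dfs dfs_alt
      simp only [hg]
      rw [hA.1, PySem.Dict.getD_eq_get?_getD, hBg]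
      rfl

-- ===== VERDICT (by name: the statement is the Claim_ definition above) =====
theorem dfs_spec : Claim_equal_dfs := by
  intro grid turn memo _hdom hpre
  unfold Spec_dfs
  exact dfs_eq_alt grid turn memo hpre
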